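-- pv_equiv track=rewrite | github.com/ihediohachidozie/mastering_python | day4/question7.py | sortedStrings
-- ===== SOURCE A (Python) =====
-- def sortedStrings(text):
--   myList = [text[x] for x in range(len(text)) if text[x] != ' ']
--   myList.sort()
--   return myList
--
--   for x in range(len(myList)):
--     for y in range(x+1, len(myList)):
--       if myList[x] > myList[y]:
--           myList[x], myList[y] = myList[y], myList[x]
--   return myList
-- ===== SOURCE B (Python) =====
-- def _merge(left, right):
--   out = []
--   i = j = 0
--   while i < len(left) and j < len(right):
--     if left[i] <= right[j]:
--       out.append(left[i]); i += 1
--     else: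
--       out.append(right[j]); j += 1
--   out.extend(left[i:])
--   out.extend(right[j:])
--   return out
--
-- def _msort(xs):
--   if len(xs) < 2:
--     return xs
--   mid = len(xs) // 2
--   return _merge(_msort(xs[:mid]), _msort(xs[mid:]))
--
-- def sortedStrings(text):
--   chars = [ch for ch in text if ch != ' ']
--   return _msort(chars)
-- ===== Notes on version B (the rewrite author's own statement) =====
-- stated objective: alternative
-- what changed: Replaces the builtin .sort() call with a hand-written top-down merge sort (recursive split at the midpoint plus a two-pointer merge), never calling sort()/sorted().
import Mathlib
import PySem

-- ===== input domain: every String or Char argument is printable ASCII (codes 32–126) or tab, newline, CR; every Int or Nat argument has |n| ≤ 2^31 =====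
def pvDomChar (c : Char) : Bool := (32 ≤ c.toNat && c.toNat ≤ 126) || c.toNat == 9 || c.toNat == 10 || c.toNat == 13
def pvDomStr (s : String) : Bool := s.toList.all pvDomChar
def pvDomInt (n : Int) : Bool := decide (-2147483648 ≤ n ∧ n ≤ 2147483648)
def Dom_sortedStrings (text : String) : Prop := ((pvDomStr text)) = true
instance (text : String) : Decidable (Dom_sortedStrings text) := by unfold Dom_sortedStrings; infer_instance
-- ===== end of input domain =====

-- B replaces the builtin .sort() with a hand-written top-down merge sort; alternative decomposition, same result.

-- ===== PORT A =====
-- [text[x] for x in range(len(text)) if text[x] != ' '] (a list of 1-char strings), then myList.sort()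
-- (ascending, default string order); the code after the first return is unreachable and not ported.
def sortedStrings (text : String) : List String :=
  PySem.List.sorted
    ((text.toList.filter (fun c => decide (c ≠ ' '))).map (fun c => String.ofList [c]))
    (fun s => s) false

-- ===== PORT B =====
-- Source B's _merge: the two-pointer while loop consuming left[i]/right[j], as the structural
-- recursion on the two lists' heads; the trailing out.extend's are the [] base cases.
def bMerge : List String → List String → List String
  | [], right => right
  | left, [] => left
  | l :: left, r :: right =>
    if l ≤ r then l :: bMerge left (r :: right)
    else r :: bMerge (l :: left) right

-- Source B's _msort: xs[:mid] / xs[mid:] with mid = len(xs)//2 (0 ≤ mid ≤ len, so the slices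
-- are exactly take/drop)
def bMsort (xs : List String) : List String :=
  if h : xs.length < 2 then xs
  else
    let mid := xs.length / 2
    bMerge (bMsort (xs.take mid)) (bMsort (xs.drop mid))
termination_by xs.length
decreasing_by
  · simp only [List.length_take]; omega
  · simp only [List.length_drop]; omega

-- chars = [ch for ch in text if ch != ' '] then _msort(chars)
def sortedStrings_alt (text : String) : List String :=
  bMsort ((text.toList.filter (fun c => decide (c ≠ ' '))).map (fun c => String.ofList [c]))

-- ===== PRECONDITION & SPEC =====
def Spec_sortedStrings (text : String) (out : List String) : Prop := out = sortedStrings_alt text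
instance (text : String) (out : List String) : Decidable (Spec_sortedStrings text out) := by unfold Spec_sortedStrings; infer_instance

-- ===== CLAIM (what is proved, stated in full; the proofs are below) =====
def Claim_equal_sortedStrings : Prop := ∀ (text : String), Dom_sortedStrings text → Spec_sortedStrings text (sortedStrings text)

-- ===== LEMMAS AND PROOFS =====

theorem bMerge_eq_merge (l r : List String) :
    bMerge l r = l.merge r (fun a b => decide (a ≤ b)) := by
  fun_induction bMerge l r with
  | case1 right => simp
  | case2 left => simp
  | case3 l left r right hle ih =>
    simp only [List.merge, ih]
    rw [if_pos (decide_eq_true hle)]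
  | case4 l left r right hle ih =>
    simp only [List.merge, ih]
    rw [if_neg (by simpa using hle)]

theorem bMsort_perm (xs : List String) : (bMsort xs).Perm xs := by
  fun_induction bMsort xs with
  | case1 xs h => exact List.Perm.refl xs
  | case2 xs h mid ih1 ih2 =>
    rw [bMerge_eq_merge]
    have h1 := List.merge_perm_append (fun a b : String => decide (a ≤ b))
      (xs := bMsort (xs.take mid)) (ys := bMsort (xs.drop mid))
    have h2 := List.Perm.append ih1 ih2
    have h3 : xs.take mid ++ xs.drop mid = xs := List.take_append_drop _ _
    exact (h1.trans h2).trans (List.Perm.of_eq h3)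

theorem bMsort_pairwise (xs : List String) :
    (bMsort xs).Pairwise (fun a b => decide (a ≤ b) = true) := by
  fun_induction bMsort xs with
  | case1 xs h =>
    match xs, h with
    | [], _ => simp
    | [x], _ => simp
  | case2 xs h mid ih1 ih2 =>
    rw [bMerge_eq_merge]
    refine List.pairwise_merge ?_ ?_ _ _ ih1 ih2
    · intro a b c hab hbc
      simp only [decide_eq_true_eq] at *
      exact le_trans hab hbc
    · intro a b
      simp only [Bool.or_eq_true, decide_eq_true_eq]
      exact le_total a b

theorem bMsort_eq_sorted (xs : List String) :
    PySem.List.sorted xs (fun s => s) false = bMsort xs := by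
  refine PySem.List.sorted_id_eq_of_perm_of_pairwise _ _ (bMsort_perm xs) ?_
  have h := bMsort_pairwise xs
  exact h.imp (by intro a b hab; simpa using hab)

-- ===== VERDICT (by name: the statement is the Claim_ definition above) =====
theorem sortedStrings_spec : Claim_equal_sortedStrings := by
  intro text _
  unfold Spec_sortedStrings sortedStrings sortedStrings_alt
  exact bMsort_eq_sorted _
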